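-- pv_equiv track=rewrite | github.com/jimjrxieb/LinkOps | services/katie_logic/kubeops/scale.py | _generate_recommendation_insight
-- ===== SOURCE A (Python) =====
-- from typing import Dict, Any, Optional, List
--
-- def _generate_recommendation_insight(recommendations: List[Dict[str, Any]]) -> str:
--     """Generate Katie's insight about scaling recommendations"""
--     if not recommendations:
--         return "Current scaling configuration appears optimal."
--
--     high_priority = [r for r in recommendations if r["priority"] == "high"]
--     if high_priority:
--         return f"High priority recommendation: {high_priority[0]['description']}"
--
--     medium_priority = [r for r in recommendations if r["priority"] == "medium"]
--     if medium_priority: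
--         return f"Consider: {medium_priority[0]['description']}"
--
--     return f"Optimization opportunity: {recommendations[0]['description']}"
-- ===== SOURCE B (Python) =====
-- from typing import Dict, Any, Optional, List
--
-- def _generate_recommendation_insight(recommendations: List[Dict[str, Any]]) -> str:
--     """Rank-and-argmin formulation: map each priority to a number, pick the single
--     minimum-rank element (min keeps the first), and index a prefix table by its rank.
--     min evaluates the key on every element, so KeyError on a missing 'priority'
--     fires exactly as in the original comprehensions; 'description' is read only
--     on the selected element."""
--     if not recommendations:
--         return "Current scaling configuration appears optimal."
--     RANK = {"high": 0, "medium": 1}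
--     rank = lambda r: RANK.get(r["priority"], 2)
--     best = min(recommendations, key=rank)
--     PREFIX = ("High priority recommendation: ",
--               "Consider: ",
--               "Optimization opportunity: ")
--     return PREFIX[rank(best)] + best["description"]
-- ===== Notes on version B (the rewrite author's own statement) =====
-- stated objective: simpler
-- what changed: Replaced the staged priority-filter comprehensions and branch chain by a numeric ranking: one min(..., key=rank) selects the element and a prefix tuple indexed by its rank builds the message.
import Mathlib
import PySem

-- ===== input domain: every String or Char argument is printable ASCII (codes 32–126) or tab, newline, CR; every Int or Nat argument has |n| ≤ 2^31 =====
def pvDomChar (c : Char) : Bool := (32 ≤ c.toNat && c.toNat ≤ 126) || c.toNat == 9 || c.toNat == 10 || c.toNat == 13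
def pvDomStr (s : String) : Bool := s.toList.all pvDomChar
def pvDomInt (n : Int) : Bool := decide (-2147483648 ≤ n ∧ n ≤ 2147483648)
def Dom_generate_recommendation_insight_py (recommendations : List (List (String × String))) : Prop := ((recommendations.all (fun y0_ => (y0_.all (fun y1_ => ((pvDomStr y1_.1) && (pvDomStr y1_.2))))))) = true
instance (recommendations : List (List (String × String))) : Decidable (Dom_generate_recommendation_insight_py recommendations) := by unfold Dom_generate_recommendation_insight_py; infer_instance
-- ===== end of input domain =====

-- B replaces A's staged priority-filter comprehensions by a numeric ranking with one min-by-rank selection and a prefix table (simpler).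


-- r["priority"] / r["description"]: first-match lookup in the association list (exact for a Python dict)
def pvKey? (r : List (String × String)) (k : String) : Option String :=
  (PySem.Dict.mk r).get? k

-- ===== PORT A =====
def generate_recommendation_insight_py (recommendations : List (List (String × String))) : String :=
  match recommendations with
  | [] => "Current scaling configuration appears optimal."
  | r0 :: _ =>
    let high_priority := recommendations.filter (fun r => pvKey? r "priority" == some "high")
    match high_priority with
    | h :: _ => "High priority recommendation: " ++ (pvKey? h "description").getD ""
    | [] =>
      let medium_priority := recommendations.filter (fun r => pvKey? r "priority" == some "medium")
      match medium_priority with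
      | m :: _ => "Consider: " ++ (pvKey? m "description").getD ""
      | [] => "Optimization opportunity: " ++ (pvKey? r0 "description").getD ""

-- ===== PORT B =====
-- RANK.get(r["priority"], 2)
def pvRank (r : List (String × String)) : Nat :=
  if pvKey? r "priority" == some "high" then 0
  else if pvKey? r "priority" == some "medium" then 1 else 2

-- min(recommendations, key=rank): Python's running first-minimum loop (keeps the earlier element on ties) — exact
def generate_recommendation_insight_py_alt (recommendations : List (List (String × String))) : String :=
  match recommendations with
  | [] => "Current scaling configuration appears optimal."
  | r0 :: rest =>
    let best := rest.foldl (fun b r => if pvRank r < pvRank b then r else b) r0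
    let p := pvRank best
    (if p = 0 then "High priority recommendation: "
     else if p = 1 then "Consider: "
     else "Optimization opportunity: ") ++ (pvKey? best "description").getD ""

-- ===== PRECONDITION & SPEC =====
-- the element whose description the function prints: first 'high', else first 'medium', else the head
def pvChosen (recommendations : List (List (String × String))) : List (String × String) :=
  ((recommendations.filter (fun r => pvKey? r "priority" == some "high")).head?.getD
    ((recommendations.filter (fun r => pvKey? r "priority" == some "medium")).head?.getD
      (recommendations.headD [])))

-- Pre_ excludes exactly the inputs where the Python raises KeyError: some element has
-- no "priority" key, or the element finally selected has no "description" key.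
def Pre_generate_recommendation_insight_py (recommendations : List (List (String × String))) : Prop :=
  (∀ r ∈ recommendations, (pvKey? r "priority").isSome) ∧
  (recommendations ≠ [] → (pvKey? (pvChosen recommendations) "description").isSome)
instance (recommendations : List (List (String × String))) : Decidable (Pre_generate_recommendation_insight_py recommendations) := by unfold Pre_generate_recommendation_insight_py; infer_instance

def pvWitness_generate_recommendation_insight_py : (List (List (String × String))) :=
  [[("priority", "low"), ("description", "tune HPA")], [("priority", "medium"), ("description", "add replicas")]]

def Spec_generate_recommendation_insight_py (recommendations : List (List (String × String))) (out : String) : Prop := out = generate_recommendation_insight_py_alt recommendations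
instance (recommendations : List (List (String × String))) (out : String) : Decidable (Spec_generate_recommendation_insight_py recommendations out) := by unfold Spec_generate_recommendation_insight_py; infer_instance

-- ===== CLAIM (what is proved, stated in full; the proofs are below) =====
def Claim_equal_generate_recommendation_insight_py : Prop := ∀ (recommendations : List (List (String × String))), Dom_generate_recommendation_insight_py recommendations → Pre_generate_recommendation_insight_py recommendations → Spec_generate_recommendation_insight_py recommendations (generate_recommendation_insight_py recommendations)

-- ===== LEMMAS AND PROOFS =====

theorem pvRank_le (r : List (String × String)) : pvRank r ≤ 2 := by
  unfold pvRank; split_ifs <;> omega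

theorem pvRank_eq_zero_iff (r : List (String × String)) :
    pvRank r = 0 ↔ (pvKey? r "priority" == some "high") = true := by
  unfold pvRank; split_ifs with h1 h2 <;> simp_all

theorem pvRank_eq_one_iff (r : List (String × String)) :
    pvRank r = 1 ↔ ((pvKey? r "priority" == some "high") = false ∧
                    (pvKey? r "priority" == some "medium") = true) := by
  unfold pvRank; split_ifs with h1 h2 <;> simp_all

-- characterisation of the running first-minimum fold: the first rank-0 element,
-- else the first rank-1 element, else the initial accumulator (whose rank bounds the search)
theorem pvMinFold_char (l : List (List (String × String))) (b : List (String × String)) :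
    l.foldl (fun b r => if pvRank r < pvRank b then r else b) b =
      if pvRank b = 0 then b
      else match (l.filter (fun r => pvRank r == 0)).head? with
      | some h => h
      | none =>
        if pvRank b = 1 then b
        else match (l.filter (fun r => pvRank r == 1)).head? with
        | some m => m
        | none => b := by
  induction l generalizing b with
  | nil => split_ifs <;> simp
  | cons r t ih =>
    have hrle := pvRank_le r
    have hble := pvRank_le b
    simp only [List.foldl_cons, List.filter_cons]
    by_cases hb0 : pvRank b = 0
    · have : ¬ pvRank r < pvRank b := by omega
      rw [if_neg this, ih]
      simp [hb0]
    · by_cases hr0 : pvRank r = 0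
      · have : pvRank r < pvRank b := by omega
        rw [if_pos this, ih]
        simp [hr0, hb0]
      · by_cases hb1 : pvRank b = 1
        · have : ¬ pvRank r < pvRank b := by omega
          rw [if_neg this, ih]
          simp [hb1, hr0]
        · -- pvRank b = 2
          have hb2 : pvRank b = 2 := by omega
          by_cases hr1 : pvRank r = 1
          · have : pvRank r < pvRank b := by omega
            rw [if_pos this, ih]
            simp [hr1, hb0, hb1]
          · have hr2 : pvRank r = 2 := by omega
            have : ¬ pvRank r < pvRank b := by omega
            rw [if_neg this, ih]
            simp [hb0, hb1, hr0, hr1]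

-- uniform shape of the min-by-rank result over the whole list
theorem pvBest_char (r0 : List (String × String)) (rest : List (List (String × String))) :
    rest.foldl (fun b r => if pvRank r < pvRank b then r else b) r0 =
      match ((r0 :: rest).filter (fun r => pvRank r == 0)).head? with
      | some h => h
      | none =>
        match ((r0 :: rest).filter (fun r => pvRank r == 1)).head? with
        | some m => m
        | none => r0 := by
  rw [pvMinFold_char]
  have h2 := pvRank_le r0
  by_cases h0 : pvRank r0 = 0
  · simp [h0]
  · by_cases h1 : pvRank r0 = 1
    · simp only [List.filter_cons, h1]
      cases hH : (rest.filter (fun r => pvRank r == 0)).head? <;> simp [hH]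
    · simp only [List.filter_cons, h0, h1]
      cases hH : (rest.filter (fun r => pvRank r == 0)).head? <;>
        cases hM : (rest.filter (fun r => pvRank r == 1)).head? <;> simp [hH, hM, h0, h1]

-- ===== VERDICT (by name: the statement is the Claim_ definition above) =====
theorem generate_recommendation_insight_py_spec : Claim_equal_generate_recommendation_insight_py := by
  intro recommendations _ _
  unfold Spec_generate_recommendation_insight_py
  unfold generate_recommendation_insight_py generate_recommendation_insight_py_alt
  cases recommendations with
  | nil => rfl
  | cons r0 rest =>
    simp only [pvBest_char]
    have hfH : (r0 :: rest).filter (fun r => pvKey? r "priority" == some "high")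
             = (r0 :: rest).filter (fun r => pvRank r == 0) := by
      apply List.filter_congr
      intro x _
      cases hb : (pvKey? x "priority" == some "high") <;>
        simp_all [pvRank_eq_zero_iff]
    rw [hfH]
    cases hH : (r0 :: rest).filter (fun r => pvRank r == 0) with
    | cons h t =>
      have hh0 : pvRank h = 0 := by
        have : h ∈ (r0 :: rest).filter (fun r => pvRank r == 0) := by simp [hH]
        simpa using (List.mem_filter.mp this).2
      simp [hh0]
    | nil =>
      have hnone : ∀ x ∈ (r0 :: rest), ¬ pvRank x = 0 := by
        intro x hx hc
        have : x ∈ (r0 :: rest).filter (fun r => pvRank r == 0) :=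
          List.mem_filter.mpr ⟨hx, by simp [hc]⟩
        simp [hH] at this
      have hfM : (r0 :: rest).filter (fun r => pvKey? r "priority" == some "medium")
               = (r0 :: rest).filter (fun r => pvRank r == 1) := by
        apply List.filter_congr
        intro x hx
        have hx0 : ¬ pvRank x = 0 := hnone x hx
        have hxh : (pvKey? x "priority" == some "high") = false := by
          cases hb : (pvKey? x "priority" == some "high")
          · rfl
          · exact absurd ((pvRank_eq_zero_iff x).2 hb) hx0
        have := pvRank_eq_one_iff x
        cases hb : (pvKey? x "priority" == some "medium") <;> simp_all
      rw [hfM]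
      cases hM : (r0 :: rest).filter (fun r => pvRank r == 1) with
      | cons m t =>
        have hm1 : pvRank m = 1 := by
          have : m ∈ (r0 :: rest).filter (fun r => pvRank r == 1) := by simp [hM]
          simpa using (List.mem_filter.mp this).2
        simp [hm1]
      | nil =>
        have h01 : ¬ pvRank r0 = 0 := hnone r0 (by simp)
        have h1 : ¬ pvRank r0 = 1 := by
          intro hc
          have : r0 ∈ (r0 :: rest).filter (fun r => pvRank r == 1) :=
            List.mem_filter.mpr ⟨by simp, by simp [hc]⟩
          simp [hM] at this
        simp [h01, h1]
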